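-- pv_equiv track=rewrite | github.com/navig-run/core | navig/agent/llm_probe.py | _pick_chat_model
-- ===== SOURCE A (Python) =====
-- def _pick_chat_model(models: list[str]) -> str:
--     """Pick the most suitable chat model from an Ollama model list."""
--     priority_patterns = [
--         "llama3.2:3b", "llama3.2", "llama3:8b", "llama3",
--         "mistral:7b", "mistral", "phi3:mini", "phi3",
--         "gemma2:2b", "gemma2", "qwen2.5:7b", "qwen2.5",
--     ]
--     for pat in priority_patterns:
--         for m in models:
--             if pat in m:
--                 return m
--     return models[0]
-- ===== SOURCE B (Python) =====
-- _PRIORITY_PATTERNS = [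
--     "llama3.2:3b", "llama3.2", "llama3:8b", "llama3",
--     "mistral:7b", "mistral", "phi3:mini", "phi3",
--     "gemma2:2b", "gemma2", "qwen2.5:7b", "qwen2.5",
-- ]
--
--
-- def _pick_chat_model(models: list[str]) -> str:
--     """Pick the most suitable chat model: the model with the lowest priority
--     rank (index of the first priority pattern it contains, or len(patterns)
--     if none), ties broken by first occurrence."""
--     def rank(m: str) -> int:
--         return next((i for i, p in enumerate(_PRIORITY_PATTERNS) if p in m),
--                     len(_PRIORITY_PATTERNS))
--     return min(models, key=rank)
-- ===== Notes on version B (the rewrite author's own statement) =====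
-- stated objective: idiomatic
-- what changed: Replaced the nested pattern-by-pattern scan over the model list with a per-model rank function (index of the first matching priority pattern) and a single min(models, key=rank); Pre_ excludes the empty list, on which both implementations raise (A IndexError, B ValueError).
-- outside the precondition, e.g. on _pick_chat_model([]): A raises IndexError, B raises ValueError
import Mathlib
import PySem

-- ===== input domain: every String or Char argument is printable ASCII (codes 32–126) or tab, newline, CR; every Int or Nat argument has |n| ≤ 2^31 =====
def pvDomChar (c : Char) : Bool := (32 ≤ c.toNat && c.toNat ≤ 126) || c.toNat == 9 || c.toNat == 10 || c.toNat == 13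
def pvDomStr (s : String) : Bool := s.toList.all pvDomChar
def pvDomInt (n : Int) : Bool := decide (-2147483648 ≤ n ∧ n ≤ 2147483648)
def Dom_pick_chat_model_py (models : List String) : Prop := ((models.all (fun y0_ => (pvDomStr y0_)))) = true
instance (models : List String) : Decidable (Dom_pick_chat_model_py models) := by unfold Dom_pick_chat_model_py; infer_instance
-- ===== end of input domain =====

-- B replaces A's nested pattern-then-model scan by a per-model rank (index of the first
-- matching priority pattern) and a single min-by-rank pass (objective: idiomatic).


-- the shared priority-pattern data (a constant list in both Pythons)
def pickPriorityPatterns : List String :=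
  ["llama3.2:3b", "llama3.2", "llama3:8b", "llama3",
   "mistral:7b", "mistral", "phi3:mini", "phi3",
   "gemma2:2b", "gemma2", "qwen2.5:7b", "qwen2.5"]

-- ===== PORT A =====
-- outer loop over patterns; the inner 'for m in models: if pat in m: return m' is find?
def pickLoopA (pats : List String) (models : List String) : Option String :=
  match pats with
  | [] => none
  | p :: rest =>
    match models.find? (fun m => PySem.Str.isIn p m) with
    | some m => some m
    | none => pickLoopA rest models

def pick_chat_model_py (models : List String) : String :=
  match pickLoopA pickPriorityPatterns models with
  | some m => m
  | none => (PySem.List.pyGet? models 0).getD ""   -- models[0]; none (IndexError) excluded by Pre_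

-- ===== PORT B =====
-- rank m = index of first priority pattern contained in m, or the number of patterns
def pickRank (m : String) : Nat :=
  (pickPriorityPatterns.findIdx? (fun p => PySem.Str.isIn p m)).getD pickPriorityPatterns.length

def pick_chat_model_py_alt (models : List String) : String :=
  (PySem.List.min? models (fun m => pickRank m)).getD ""  -- min(models, key=rank); [] excluded by Pre_

-- ===== PRECONDITION & SPEC =====
-- On [] A raises IndexError and B raises ValueError; neither returns, so [] is excluded.
def Pre_pick_chat_model_py (models : List String) : Prop := models ≠ []
instance (models : List String) : Decidable (Pre_pick_chat_model_py models) := by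
  unfold Pre_pick_chat_model_py; infer_instance

def pvWitness_pick_chat_model_py : List String := ["gpt", "llama3:8b-extra"]

def Spec_pick_chat_model_py (models : List String) (out : String) : Prop := out = pick_chat_model_py_alt models
instance (models : List String) (out : String) : Decidable (Spec_pick_chat_model_py models out) := by unfold Spec_pick_chat_model_py; infer_instance

-- ===== CLAIM (what is proved, stated in full; the proofs are below) =====
def Claim_equal_pick_chat_model_py : Prop := ∀ (models : List String), Dom_pick_chat_model_py models → Pre_pick_chat_model_py models → Spec_pick_chat_model_py models (pick_chat_model_py models)

-- ===== LEMMAS AND PROOFS =====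

-- the running-minimum fold that min? performs once seeded with a first element
def pickMinBy (key : String → Nat) (x : String) (t : List String) : String :=
  t.foldl (fun m y => if key y < key m then y else m) x

theorem pick_min?_cons (key : String → Nat) (x : String) (t : List String) :
    PySem.List.min? (x :: t) key = some (pickMinBy key x t) := by
  unfold PySem.List.min? pickMinBy
  simp only [List.foldl_cons]
  induction t generalizing x with
  | nil => rfl
  | cons y t ih =>
    simp only [List.foldl_cons]
    split <;> exact ih _

theorem pickMinBy_key_zero (key : String → Nat) (x : String) (t : List String)
    (hx : key x = 0) : pickMinBy key x t = x := by
  induction t with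
  | nil => rfl
  | cons y t ih =>
    unfold pickMinBy
    simp only [List.foldl_cons, hx, Nat.not_lt_zero, if_false]
    exact ih

theorem pickMinBy_find_zero (key : String → Nat) (t : List String) (x m : String)
    (hx : key x ≠ 0) (h : t.find? (fun y => key y == 0) = some m) :
    pickMinBy key x t = m := by
  induction t generalizing x with
  | nil => simp at h
  | cons y t ih =>
    unfold pickMinBy
    simp only [List.foldl_cons]
    by_cases hy : key y = 0
    · rw [List.find?_cons_of_pos (by simp [hy])] at h
      injection h with h; subst h
      rw [if_pos (by omega : key y < key x)]
      exact pickMinBy_key_zero key y t hy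
    · rw [List.find?_cons_of_neg (by simp [hy])] at h
      split
      · exact ih y hy h
      · exact ih x hx h

theorem pickMinBy_congr (k1 k2 : String → Nat) (x : String) (t : List String)
    (h : ∀ y ∈ x :: t, k1 y = k2 y) : pickMinBy k1 x t = pickMinBy k2 x t := by
  induction t generalizing x with
  | nil => rfl
  | cons y t ih =>
    unfold pickMinBy
    simp only [List.foldl_cons]
    rw [h y (by simp), h x (by simp)]
    split
    · exact ih y (fun z hz => h z (by
        rcases List.mem_cons.mp hz with h1 | h1
        · simp [h1]
        · simp [h1]))
    · exact ih x (fun z hz => h z (by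
        rcases List.mem_cons.mp hz with h1 | h1
        · simp [h1]
        · simp [h1]))

theorem pickMinBy_shift (key : String → Nat) (x : String) (t : List String) :
    pickMinBy (fun m => key m + 1) x t = pickMinBy key x t := by
  simp only [pickMinBy, Nat.add_lt_add_iff_right]


theorem pick_find?_congr {α : Type} (p q : α → Bool) (l : List α)
    (h : ∀ y ∈ l, p y = q y) : l.find? p = l.find? q := by
  induction l with
  | nil => rfl
  | cons x t ih =>
    rw [List.find?_cons, List.find?_cons, h x (by simp)]
    cases q x
    · exact ih fun y hy => h y (by simp [hy])
    · rfl

-- rank with respect to an arbitrary pattern list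
def pickRankG (pats : List String) (m : String) : Nat :=
  (pats.findIdx? (fun p => PySem.Str.isIn p m)).getD pats.length

theorem pickRankG_cons (p : String) (rest : List String) (m : String) :
    pickRankG (p :: rest) m =
      if PySem.Str.isIn p m then 0 else pickRankG rest m + 1 := by
  unfold pickRankG
  rw [List.findIdx?_cons]
  by_cases h : PySem.Str.isIn p m = true
  · rw [if_pos h, if_pos h]; rfl
  · rw [if_neg h, if_neg h]
    cases hf : rest.findIdx? (fun p => PySem.Str.isIn p m) <;> simp

theorem pickRankG_nil (m : String) : pickRankG [] m = 0 := rfl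

theorem pick_main (pats : List String) (x : String) (t : List String) :
    (match pickLoopA pats (x :: t) with
     | some m => m
     | none => x) = pickMinBy (pickRankG pats) x t := by
  induction pats with
  | nil =>
    rw [pickMinBy_congr _ (fun _ => 0) x t (fun y _ => pickRankG_nil y)]
    exact (pickMinBy_key_zero _ x t rfl).symm
  | cons p rest ih =>
    unfold pickLoopA
    cases hf : (x :: t).find? (fun m => PySem.Str.isIn p m) with
    | some m =>
      simp only []
      by_cases hx : PySem.Str.isIn p x = true
      · rw [List.find?_cons_of_pos hx] at hf
        injection hf with hf; subst hf
        refine (pickMinBy_key_zero _ x t ?_).symm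
        rw [pickRankG_cons, if_pos hx]
      · rw [List.find?_cons_of_neg (by simpa using hx)] at hf
        refine (pickMinBy_find_zero _ t x m ?_ ?_).symm
        · rw [pickRankG_cons, if_neg hx]; omega
        · rw [← hf]
          refine pick_find?_congr _ _ t (fun y _ => ?_)
          rw [pickRankG_cons]
          simp only [PySem.Str.isIn_eq]
          by_cases hy : PySem.Chars.isIn p.toList y.toList = true <;> simp [hy]
    | none =>
      simp only []
      rw [ih]
      rw [pickMinBy_congr (pickRankG (p :: rest)) (fun m => pickRankG rest m + 1) x t ?_]
      · exact (pickMinBy_shift (pickRankG rest) x t).symm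
      · intro y hy
        have : PySem.Str.isIn p y = false := by
          have := List.find?_eq_none.mp hf y hy
          simpa using this
        rw [pickRankG_cons, this]
        simp

-- ===== VERDICT (by name: the statement is the Claim_ definition above) =====
theorem pick_chat_model_py_spec : Claim_equal_pick_chat_model_py := by
  intro models _ hpre
  unfold Spec_pick_chat_model_py
  cases models with
  | nil => exact absurd rfl hpre
  | cons x t =>
    unfold pick_chat_model_py pick_chat_model_py_alt
    rw [pick_min?_cons]
    simp only [Option.getD_some]
    have hkey : pickMinBy (fun m => pickRank m) x t
        = pickMinBy (pickRankG pickPriorityPatterns) x t := rfl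
    rw [hkey, ← pick_main pickPriorityPatterns x t]
    cases hl : pickLoopA pickPriorityPatterns (x :: t) with
    | some m => rfl
    | none => simp [PySem.List.pyGet?, PySem.List.pyIdx?]
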